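-- pv_equiv track=rewrite | github.com/patt502090/Programming-Competitions | icpc 2024/icpc cake.py | calculate_max_deliciousness
-- ===== SOURCE A (Python) =====
-- def calculate_max_deliciousness(N):
--     # ถ้าจำนวนชิ้นเค้กน้อยกว่า 3 จะไม่สามารถกินได้ตามกฎ
--     if N < 3:
--         return 0
--
--     total_deliciousness = 0
--
--     # คำนวณค่าความอร่อยจากการกินชิ้นเค้กที่ดีที่สุด
--     for i in range(1, N - 1):
--         for j in range(1, N - 1):
--             if j != i:
--                 total_deliciousness += abs(i - j)
--
--     return total_deliciousness
-- ===== SOURCE B (Python) =====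
-- def calculate_max_deliciousness(N):
--     # Closed form: sum of |i-j| over all ordered pairs i != j in 1..N-2
--     # equals (m^3 - m) / 3 for m = N - 2.
--     if N < 3:
--         return 0
--     m = N - 2
--     return (m * m * m - m) // 3
-- ===== Notes on version B (the rewrite author's own statement) =====
-- stated objective: faster
-- what changed: Replaced the quadratic double loop over index pairs by the closed-form formula (m^3-m)/3 with m=N-2.
import Mathlib
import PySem

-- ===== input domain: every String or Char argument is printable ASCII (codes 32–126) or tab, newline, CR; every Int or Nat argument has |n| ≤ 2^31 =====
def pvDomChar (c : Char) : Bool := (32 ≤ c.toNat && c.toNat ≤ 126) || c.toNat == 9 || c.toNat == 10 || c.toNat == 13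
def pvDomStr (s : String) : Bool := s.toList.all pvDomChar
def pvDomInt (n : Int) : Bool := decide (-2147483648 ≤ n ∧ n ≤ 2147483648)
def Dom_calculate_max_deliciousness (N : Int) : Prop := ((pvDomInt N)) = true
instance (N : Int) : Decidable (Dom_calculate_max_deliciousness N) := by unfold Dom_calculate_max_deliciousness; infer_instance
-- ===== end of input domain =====

-- B replaces A's quadratic double loop by the closed-form formula (m^3-m)//3, m = N-2 (objective: faster, O(1)).

-- ===== PORT A =====
def calculate_max_deliciousness (N : Int) : Int :=
  if N < 3 then 0
  else
    (PySem.List.pyRange 1 (N - 1) 1).foldl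
      (fun total i =>
        (PySem.List.pyRange 1 (N - 1) 1).foldl
          (fun total j => if j ≠ i then total + |i - j| else total) total)
      0

-- ===== PORT B =====
def calculate_max_deliciousness_alt (N : Int) : Int :=
  if N < 3 then 0
  else
    let m := N - 2
    PySem.Int.floordiv (m * m * m - m) 3

-- ===== PRECONDITION & SPEC =====
def Spec_calculate_max_deliciousness (N : Int) (out : Int) : Prop := out = calculate_max_deliciousness_alt N
instance (N : Int) (out : Int) : Decidable (Spec_calculate_max_deliciousness N out) := by unfold Spec_calculate_max_deliciousness; infer_instance

-- ===== CLAIM (what is proved, stated in full; the proofs are below) =====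
def Claim_equal_calculate_max_deliciousness : Prop := ∀ (N : Int), Dom_calculate_max_deliciousness N → Spec_calculate_max_deliciousness N (calculate_max_deliciousness N)

-- ===== LEMMAS AND PROOFS =====

-- The inner loop is acc plus the sum of |i-j| over the list (the skipped j = i term is 0 anyway).
theorem pv_inner_fold (L : List Int) (i acc : Int) :
    L.foldl (fun total j => if j ≠ i then total + |i - j| else total) acc
      = acc + (L.map (fun j => |i - j|)).sum := by
  induction L generalizing acc with
  | nil => simp
  | cons x xs ih =>
    simp only [List.foldl_cons, List.map_cons, List.sum_cons, ih]
    by_cases h : x = i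
    · subst h; simp
    · rw [if_pos h]; ring

-- The outer loop is the sum of the inner sums.
theorem pv_outer_fold (L M : List Int) (acc : Int) :
    L.foldl (fun total i =>
      M.foldl (fun total j => if j ≠ i then total + |i - j| else total) total) acc
      = acc + (L.map (fun i => (M.map (fun j => |i - j|)).sum)).sum := by
  induction L generalizing acc with
  | nil => simp
  | cons x xs ih =>
    rw [List.foldl_cons, pv_inner_fold, ih, List.map_cons, List.sum_cons]; ring

theorem pv_sum_map_sub (L : List Int) (c : Int) :
    (L.map (fun i => c - i)).sum = L.length * c - L.sum := by
  induction L with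
  | nil => simp
  | cons x xs ih => simp [ih]; ring

-- Sum of 1..m.
theorem pv_sum_range (m : Nat) :
    2 * (PySem.List.pyRange 1 (1 + (m : Int)) 1).sum = m * (m + 1) := by
  induction m with
  | zero => simp [PySem.List.pyRange_one_eq_nil]
  | succ m ih =>
    have h : (1 : Int) + ((m : Int) + 1) = (1 + (m : Int)) + 1 := by ring
    rw [show ((m + 1 : Nat) : Int) = (m : Int) + 1 by push_cast; ring, h,
      PySem.List.pyRange_one_succ_right (by omega)]
    simp only [List.sum_append, List.sum_cons, List.sum_nil]
    push_cast
    nlinarith [ih]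

-- Triangle sum: Σ_{i=1}^{m} |i - (1+m)| = m(m+1)/2.
theorem pv_triangle (m : Nat) :
    2 * ((PySem.List.pyRange 1 (1 + (m : Int)) 1).map (fun i => |i - (1 + (m : Int))|)).sum
      = m * (m + 1) := by
  have hcongr : ((PySem.List.pyRange 1 (1 + (m : Int)) 1).map (fun i => |i - (1 + (m : Int))|))
      = ((PySem.List.pyRange 1 (1 + (m : Int)) 1).map (fun i => (1 + (m : Int)) - i)) := by
    apply List.map_congr_left
    intro i hi
    rw [PySem.List.mem_pyRange_one] at hi
    rw [abs_of_nonpos (by omega)]; ring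
  rw [hcongr, pv_sum_map_sub, PySem.List.length_pyRange_one]
  have hs := pv_sum_range m
  have hl : ((1 + (m : Int) - 1).toNat : Int) = (m : Int) := by omega
  nlinarith [hs, hl]

-- Sums distribute over pointwise addition of the mapped functions.
theorem pv_sum_map_add (L : List Int) (f g : Int → Int) :
    (L.map (fun i => f i + g i)).sum = (L.map f).sum + (L.map g).sum := by
  induction L with
  | nil => simp
  | cons x xs ih => simp only [List.map_cons, List.sum_cons, ih]; ring

-- Main closed form: 3 × (double sum of |i-j| over 1..m) = m^3 - m.
theorem pv_main (m : Nat) :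
    3 * ((PySem.List.pyRange 1 (1 + (m : Int)) 1).map
          (fun i => ((PySem.List.pyRange 1 (1 + (m : Int)) 1).map (fun j => |i - j|)).sum)).sum
      = (m : Int) ^ 3 - m := by
  induction m with
  | zero => simp [PySem.List.pyRange_one_eq_nil]
  | succ m ih =>
    have h : (1 : Int) + ((m : Int) + 1) = (1 + (m : Int)) + 1 := by ring
    rw [show ((m + 1 : Nat) : Int) = (m : Int) + 1 by push_cast; ring, h,
      PySem.List.pyRange_one_succ_right (by omega)]
    simp only [List.map_append, List.sum_append, List.map_cons, List.map_nil,
      List.sum_cons, List.sum_nil, sub_self, abs_zero, add_zero, pv_sum_map_add]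
    have hrow : ((PySem.List.pyRange 1 (1 + (m : Int)) 1).map
        (fun j => |(1 + (m : Int)) - j|)).sum
        = ((PySem.List.pyRange 1 (1 + (m : Int)) 1).map
        (fun i => |i - (1 + (m : Int))|)).sum := by
      apply congrArg
      apply List.map_congr_left
      intro i _
      rw [abs_sub_comm]
    rw [hrow]
    have ht := pv_triangle m
    linear_combination ih + 3 * ht

theorem pv_fdiv_cancel (s : Int) : PySem.Int.floordiv (3 * s) 3 = s := by
  rw [PySem.Int.floordiv_eq_ediv_of_pos (by norm_num)]
  omega

-- ===== VERDICT (by name: the statement is the Claim_ definition above) =====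
theorem calculate_max_deliciousness_spec : Claim_equal_calculate_max_deliciousness := by
  intro N _
  unfold Spec_calculate_max_deliciousness calculate_max_deliciousness calculate_max_deliciousness_alt
  by_cases h : N < 3
  · simp [h]
  · simp only [h, if_false]
    set m : Nat := (N - 2).toNat with hm
    have hN1 : N - 1 = 1 + (m : Int) := by omega
    have hN2 : N - 2 = (m : Int) := by omega
    rw [hN1, pv_outer_fold, zero_add, hN2]
    have hmain := pv_main m
    have : (m : Int) * m * m - m = 3 * ((PySem.List.pyRange 1 (1 + (m : Int)) 1).map
        (fun i => ((PySem.List.pyRange 1 (1 + (m : Int)) 1).map (fun j => |i - j|)).sum)).sum := by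
      nlinarith [hmain]
    rw [this, pv_fdiv_cancel]
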